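-- pv_equiv track=rewrite | github.com/kd-zh/ESIPS | Code/LTS/ocr_canny.py | get_label_wave
-- ===== SOURCE A (Python) =====
-- WAVE_TYPE_UP = "^"
--
-- WAVE_TYPE_DOWN = "v"
--
-- WAVE_TYPE_STABLE = "-"
--
-- def get_char_level(WAVE, ch):
--     for k, v in WAVE.items():
--         if ch in v:
--             return k
--     return 0
--
-- def get_label_wave(WAVE: dict, label: str):
--     last = None
--     wave = ""
--     for ch in label:
--         if last is not None:
--             last_level = get_char_level(WAVE, last)
--             level = get_char_level(WAVE, ch)
--             if ch == " ":
--                 w = " "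
--             elif level > last_level:
--                 w = WAVE_TYPE_UP
--             elif level == last_level:
--                 w = WAVE_TYPE_STABLE
--             else:
--                 w = WAVE_TYPE_DOWN
--             wave = wave + w
--         last = ch
--     return wave
-- ===== SOURCE B (Python) =====
-- def get_label_wave(WAVE: dict, label: str):
--     levels = [next((k for k, v in WAVE.items() if ch in v), 0) for ch in label]
--     return "".join(
--         " " if b == " " else "^" if lb > la else "-" if lb == la else "v"
--         for b, la, lb in zip(label[1:], levels, levels[1:])
--     )
-- ===== Notes on version B (the rewrite author's own statement) =====
-- stated objective: simpler
-- what changed: A's stateful loop tracking the previous character and recomputing levels is replaced by one map building a precomputed level list and one pairwise zip pass over adjacent positions, joined into the result.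
import Mathlib
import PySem

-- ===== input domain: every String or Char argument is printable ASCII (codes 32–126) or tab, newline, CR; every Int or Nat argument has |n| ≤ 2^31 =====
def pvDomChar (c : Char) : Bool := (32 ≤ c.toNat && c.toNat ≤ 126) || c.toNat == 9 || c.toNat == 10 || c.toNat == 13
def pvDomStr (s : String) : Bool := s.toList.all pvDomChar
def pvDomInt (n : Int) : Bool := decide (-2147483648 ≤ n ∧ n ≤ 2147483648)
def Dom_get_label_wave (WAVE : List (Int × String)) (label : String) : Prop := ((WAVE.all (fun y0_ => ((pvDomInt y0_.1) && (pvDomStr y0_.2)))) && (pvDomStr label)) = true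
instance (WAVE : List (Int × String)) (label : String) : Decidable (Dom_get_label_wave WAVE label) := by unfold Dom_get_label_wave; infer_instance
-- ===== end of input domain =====

-- B replaces A's stateful last-char loop by a precomputed level table and a single pairwise pass (objective: simpler).

-- ===== PORT A =====
-- get_char_level: first key whose value string contains ch, else 0
def pvCharLevelA (WAVE : List (Int × String)) (ch : Char) : Int :=
  match WAVE with
  | [] => 0
  | (k, v) :: rest => if v.toList.contains ch then k else pvCharLevelA rest ch

def pvStepA (WAVE : List (Int × String)) (st : Option Char × String) (ch : Char) :
    Option Char × String :=
  match st.1 with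
  | none => (some ch, st.2)
  | some last =>
    let last_level := pvCharLevelA WAVE last
    let level := pvCharLevelA WAVE ch
    let w : String :=
      if ch = ' ' then " "
      else if level > last_level then "^"
      else if level = last_level then "-"
      else "v"
    (some ch, st.2 ++ w)

def get_label_wave (WAVE : List (Int × String)) (label : String) : String :=
  (label.toList.foldl (pvStepA WAVE) (none, "")).2

-- ===== PORT B =====
-- next((k for k, v in WAVE.items() if ch in v), 0)
def pvCharLevelB (WAVE : List (Int × String)) (ch : Char) : Int :=
  ((WAVE.find? (fun kv => kv.2.toList.contains ch)).map Prod.fst).getD 0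

def pvWaveSym (b : Char) (la lb : Int) : Char :=
  if b = ' ' then ' ' else if lb > la then '^' else if lb = la then '-' else 'v'

def get_label_wave_alt (WAVE : List (Int × String)) (label : String) : String :=
  let cs := label.toList
  let levels := cs.map (pvCharLevelB WAVE)
  String.ofList (((cs.tail.zip levels).zip levels.tail).map (fun p => pvWaveSym p.1.1 p.1.2 p.2))

-- ===== PRECONDITION & SPEC =====
def Spec_get_label_wave (WAVE : List (Int × String)) (label : String) (out : String) : Prop := out = get_label_wave_alt WAVE label
instance (WAVE : List (Int × String)) (label : String) (out : String) : Decidable (Spec_get_label_wave WAVE label out) := by unfold Spec_get_label_wave; infer_instance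

-- ===== CLAIM (what is proved, stated in full; the proofs are below) =====
def Claim_equal_get_label_wave : Prop := ∀ (WAVE : List (Int × String)) (label : String), Dom_get_label_wave WAVE label → Spec_get_label_wave WAVE label (get_label_wave WAVE label)

-- ===== LEMMAS AND PROOFS =====

-- the wave characters produced after having seen `last`, as a char list
def pvPairsA (WAVE : List (Int × String)) (last : Char) : List Char → List Char
  | [] => []
  | ch :: rest =>
      pvWaveSym ch (pvCharLevelA WAVE last) (pvCharLevelA WAVE ch) :: pvPairsA WAVE ch rest

theorem pvLevel_eq (WAVE : List (Int × String)) :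
    pvCharLevelB WAVE = pvCharLevelA WAVE := by
  funext ch
  induction WAVE with
  | nil => rfl
  | cons kv rest ih =>
    obtain ⟨k, v⟩ := kv
    by_cases hm : ch ∈ v.toList
    · simp [pvCharLevelA, pvCharLevelB, List.find?, hm]
    · simp only [pvCharLevelA, pvCharLevelB, List.find?, hm, decide_false,
        List.contains_eq_mem]
      simpa [pvCharLevelB] using ih

theorem pvLoopA (WAVE : List (Int × String)) (cs : List Char) :
    ∀ (last : Char) (w : String),
      (cs.foldl (pvStepA WAVE) (some last, w)).2 = w ++ String.ofList (pvPairsA WAVE last cs) := by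
  induction cs with
  | nil => intro last w; simp [pvPairsA]
  | cons ch rest ih =>
    intro last w
    simp only [List.foldl, pvStepA, pvPairsA, ih]
    have hmk : ∀ (c : Char) (l : List Char),
        String.ofList (c :: l) = String.ofList [c] ++ String.ofList l := by
      intro c l; rw [show c :: l = [c] ++ l from rfl, String.ofList_append]
    rw [hmk, ← String.append_assoc]
    congr 2
    unfold pvWaveSym
    split_ifs <;> rfl

theorem pvZip_eq (WAVE : List (Int × String)) (cs : List Char) :
    ∀ (last : Char),
      (((cs.zip ((last :: cs).map (pvCharLevelA WAVE))).zip (cs.map (pvCharLevelA WAVE))).map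
          (fun p => pvWaveSym p.1.1 p.1.2 p.2)) = pvPairsA WAVE last cs := by
  induction cs with
  | nil => intro last; rfl
  | cons ch rest ih =>
    intro last
    simp only [List.map, List.zip_cons_cons, pvPairsA]
    exact congrArg _ (by simpa using ih ch)

theorem get_label_wave_eq (WAVE : List (Int × String)) (label : String) :
    get_label_wave WAVE label = get_label_wave_alt WAVE label := by
  unfold get_label_wave get_label_wave_alt
  rw [pvLevel_eq]
  cases h : label.toList with
  | nil => rfl
  | cons c cs =>
    simp only [List.foldl, pvStepA, List.tail_cons, List.map_cons]
    rw [pvLoopA]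
    rw [show pvCharLevelA WAVE c :: cs.map (pvCharLevelA WAVE)
          = (c :: cs).map (pvCharLevelA WAVE) from rfl, pvZip_eq]
    simp

-- ===== VERDICT (by name: the statement is the Claim_ definition above) =====
theorem get_label_wave_spec : Claim_equal_get_label_wave := by
  intro WAVE label _
  unfold Spec_get_label_wave
  exact get_label_wave_eq WAVE label
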